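-- pv_equiv track=rewrite | github.com/Loknar/loka-ord | lokaord/seer.py | word_change_possibilities
-- ===== SOURCE A (Python) =====
-- from collections.abc import Iterable
-- import itertools
-- from typing import Callable
--
-- def word_change_possibilities(word: str) -> Iterable[str]:
-- 	"""
-- 	provide possible word adjustments for identification attempt purposes
-- 	"""
--
-- 	def deep_replace(word: str, sub_a: str, sub_b: str) -> Iterable[str]:
-- 		"""
-- 		provide all possibilities of sub_a -> sub_b replacements
-- 		"""
-- 		occurances = []
-- 		for loc in range(len(word)):
-- 			if word[loc:loc + len(sub_a)] == sub_a:
-- 				occurances.append(loc)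
-- 		len_occ = len(occurances)
-- 		if len_occ == 0:
-- 			return [word]
-- 		combinations = [x for x in itertools.product([False, True], repeat=len_occ)]
-- 		possibilities = []
-- 		for i in range(len(combinations)):
-- 			option = word
-- 			for j in range(len_occ):
-- 				if combinations[i][j] is True:
-- 					option = option[:occurances[j]] + sub_b + option[occurances[j] + len(sub_a):]
-- 			possibilities.append(option)
-- 		return possibilities
--
-- 	def ellify(word: str) -> Iterable[str]:
-- 		"""
-- 		provide all possibilities of ll -> łl and LL -> ŁL replacements
-- 		"""
-- 		return (deep_replace(word, 'll', 'łl') + deep_replace(word, 'LL', 'ŁL'))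
--
-- 	def uppercase(word: str) -> str:
-- 		return '%s%s' % (word[0].upper(), word[1:])
--
-- 	def lowercase(word: str) -> str:
-- 		return word.lower()
--
-- 	def lower_then_uppercase(word: str) -> str:
-- 		return uppercase(lowercase(word))
--
-- 	def apply_possibility(
-- 		word: str, applier: list[bool], change_functions: list[Callable[[str], str]]
-- 	) -> str:
-- 		if len(applier) != len(change_functions):
-- 			raise Exception('applier and change_functions lists should have same length')
-- 		e_word = word
-- 		for i in range(len(applier)):
-- 			if applier[i] is True:
-- 				e_word = change_functions[i](e_word)
-- 		return e_word
--
-- 	def move_uppercase_to_front(mylist: Iterable[str]) -> Iterable[str]: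
-- 		upper = []
-- 		lower = []
-- 		for entry in mylist:
-- 			if entry == uppercase(entry):
-- 				upper.append(entry)
-- 			else:
-- 				lower.append(entry)
-- 		return (upper + lower)
--
-- 	change_functions = [
-- 		uppercase,
-- 		lowercase,
-- 		lower_then_uppercase,
-- 	]
-- 	len_change_functions = len(change_functions)
-- 	appliers = sorted(
-- 		list(set(itertools.permutations(
-- 			[True] * len_change_functions + [False] * (len_change_functions - 1),
-- 			len_change_functions))
-- 		),
-- 		reverse=True
-- 	)
-- 	myset = set([word])
-- 	for ellified in ellify(word):
-- 		for applier in appliers: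
-- 			myset.add(apply_possibility(ellified, applier, change_functions))
-- 	possibilities = sorted(list(myset), reverse=True)
-- 	if word == uppercase(word):
-- 		return move_uppercase_to_front(possibilities)
-- 	return possibilities
-- ===== SOURCE B (Python) =====
-- def word_change_possibilities(word):
--     """
--     Same matching variants as the original, built differently: variants of the word
--     are generated by an incremental left-to-right fork (no occurrence-index lists,
--     no itertools.product, no splicing), and the seven permutation-derived case
--     appliers collapse to the three distinct transforms they compose to:
--     capitalize-first, lowercase, and lowercase-then-capitalize.
--     """
--
--     def fork(s, pat, rep0):
--         # all ways of independently replacing matches of pat (two equal letters)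
--         # by rep0 + pat[1]: fork every accumulated variant at each match,
--         # buffering plain text in between
--         outs = ['']
--         buf = []
--         for j, ch in enumerate(s):
--             if s[j:j + 2] == pat:
--                 text = ''.join(buf)
--                 buf = []
--                 outs = [p + text + c for p in outs for c in (ch, rep0)]
--             else:
--                 buf.append(ch)
--         tail = ''.join(buf)
--         return [p + tail for p in outs]
--
--     def capitalize_first(s):
--         return s[0].upper() + s[1:]
--
--     variants = fork(word, 'll', 'ł') + fork(word, 'LL', 'Ł')
--     found = {word}
--     for v in variants:
--         low = v.lower()
--         found.update((capitalize_first(v), low, capitalize_first(low)))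
--     out = sorted(found, reverse=True)
--     if word == capitalize_first(word):
--         is_cap = lambda s: s == capitalize_first(s)
--         return [w for w in out if is_cap(w)] + [w for w in out if not is_cap(w)]
--     return out
-- ===== Notes on version B (the rewrite author's own statement) =====
-- stated objective: simpler
-- what changed: deep_replace's occurrence-index list + itertools.product + per-combination splicing is replaced by a single left-to-right scan that forks every accumulated variant at each double-letter match (buffering the text in between), and the seven sorted-permutation-derived case appliers are collapsed to the three distinct transforms they compose to (capitalize-first, lowercase, lowercase-then-capitalize); the set union, reverse sort and uppercase-first partition stay.
import Mathlib
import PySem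

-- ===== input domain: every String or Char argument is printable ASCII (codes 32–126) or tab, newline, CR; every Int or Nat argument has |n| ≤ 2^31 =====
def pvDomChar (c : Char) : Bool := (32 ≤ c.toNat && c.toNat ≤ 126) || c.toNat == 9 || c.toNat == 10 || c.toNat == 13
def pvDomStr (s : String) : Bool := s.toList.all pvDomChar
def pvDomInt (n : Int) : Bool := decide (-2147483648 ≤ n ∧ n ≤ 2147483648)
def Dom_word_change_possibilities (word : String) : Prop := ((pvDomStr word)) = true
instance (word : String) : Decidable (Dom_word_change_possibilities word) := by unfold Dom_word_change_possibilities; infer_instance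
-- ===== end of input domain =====

-- B replaces A's occurrence-index/itertools.product splicing by an incremental left-to-right
-- fork and the seven permutation-derived case appliers by the three transforms they compose
-- to (objective: simpler). Return-value equivalence on Pre_ (word ≠ "", where Python A returns).

-- Shared primitive helpers: Python's str.upper/str.lower on ONE character.  PySem's
-- upperChar/lowerChar are ASCII-only; these extend them with 'ł'/'Ł' — the only non-ASCII
-- characters either program ever creates (Dom inputs are ASCII) — and are exact there.
def pvUpperChar (c : Char) : Char := if c = 'ł' then 'Ł' else PySem.Chars.upperChar c
def pvLowerChar (c : Char) : Char := if c = 'Ł' then 'ł' else PySem.Chars.lowerChar c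

-- ===== PORT A =====

-- itertools.product([False, True], repeat=n), ported by hand (CPython order: the
-- first coordinate varies slowest, the last fastest); exact.
def pvA_prodBools : Nat → List (List Bool)
  | 0 => [[]]
  | n + 1 => [false, true].flatMap (fun x => (pvA_prodBools n).map (x :: ·))

def pvA_deepReplace (s sub_a sub_b : List Char) : List (List Char) :=
  let occurances : List Nat := (List.range s.length).foldl
    (fun (acc : List Nat) (loc : Nat) =>
      if PySem.List.slice s (some (loc : Int)) (some ((loc : Int) + (sub_a.length : Int))) == sub_a
      then acc ++ [loc] else acc) []
  let lenOcc := occurances.length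
  if lenOcc = 0 then [s]
  else
    let combinations := pvA_prodBools lenOcc
    (List.range combinations.length).foldl (fun possibilities (i : Nat) =>
      possibilities ++ [(List.range lenOcc).foldl (fun option (j : Nat) =>
        if PySem.List.pyGetD (PySem.List.pyGetD combinations (i : Int) []) (j : Int) false then
          PySem.List.slice option none (some (((PySem.List.pyGetD occurances (j : Int) 0 : Nat) : Int)))
            ++ sub_b
            ++ PySem.List.slice option (some (((PySem.List.pyGetD occurances (j : Int) 0 : Nat) : Int) + (sub_a.length : Int))) none
        else option) s]) []

-- '%s%s' % (word[0].upper(), word[1:]); Python raises IndexError on '' (excluded by Pre_,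
-- and every string this is applied to is nonempty there).
def pvA_uppercase (s : List Char) : List Char :=
  match s with
  | [] => []
  | c :: t => pvUpperChar c :: t

def pvA_lowercase (s : List Char) : List Char := s.map pvLowerChar

def pvA_lowerThenUppercase (s : List Char) : List Char := pvA_uppercase (pvA_lowercase s)

def pvA_ellify (s : List Char) : List (List Char) :=
  pvA_deepReplace s ['l', 'l'] ['ł', 'l'] ++ pvA_deepReplace s ['L', 'L'] ['Ł', 'L']

-- the 'raise Exception' on a length mismatch is modeled as none; it is unreachable at both
-- call sites (applier and change_functions always have length 3), so the .getD [] at the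
-- call site is never consulted.
def pvA_applyPossibility (s : List Char) (applier : List Bool)
    (changeFunctions : List (List Char → List Char)) : Option (List Char) :=
  if applier.length ≠ changeFunctions.length then none
  else some ((List.range applier.length).foldl
    (fun e i =>
      if PySem.List.pyGetD applier (i : Int) false then
        (PySem.List.pyGetD changeFunctions (i : Int) id) e
      else e) s)

def pvA_moveUppercaseToFront (mylist : List (List Char)) : List (List Char) :=
  let ul := mylist.foldl
    (fun (ul : List (List Char) × List (List Char)) entry =>
      if entry == pvA_uppercase entry then (ul.1 ++ [entry], ul.2) else (ul.1, ul.2 ++ [entry]))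
    ([], [])
  ul.1 ++ ul.2

def word_change_possibilities (word : String) : List String :=
  let w := word.toList
  let changeFunctions : List (List Char → List Char) :=
    [pvA_uppercase, pvA_lowercase, pvA_lowerThenUppercase]
  let lenCF := changeFunctions.length
  let appliers := PySem.List.sorted
    (PySem.Set.ofList (PySem.List.permutations
      (List.replicate lenCF true ++ List.replicate (lenCF - 1) false) lenCF))
    (fun x => x) true
  let myset := (pvA_ellify w).foldl
    (fun s ellified => appliers.foldl
      (fun s applier =>
        PySem.Set.add s ((pvA_applyPossibility ellified applier changeFunctions).getD [])) s)
    (PySem.Set.ofList [w])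
  let possibilities := PySem.List.sorted myset (fun x => x) true
  if w == pvA_uppercase w then (pvA_moveUppercaseToFront possibilities).map String.ofList
  else possibilities.map String.ofList

-- ===== PORT B =====

def pvB_fork (s pat : List Char) (rep0 : Char) : List (List Char) :=
  let ob := (PySem.List.enumerate s).foldl
    (fun (ob : List (List Char) × List Char) jc =>
      if PySem.List.slice s (some jc.1) (some (jc.1 + 2)) == pat then
        (ob.1.flatMap (fun p => [p ++ ob.2 ++ [jc.2], p ++ ob.2 ++ [rep0]]), [])
      else
        (ob.1, ob.2 ++ [jc.2])) ([[]], [])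
  ob.1.map (fun p => p ++ ob.2)

-- s[0].upper() + s[1:]; IndexError on '' (excluded by Pre_)
def pvB_capitalizeFirst (s : List Char) : List Char :=
  match s with
  | [] => []
  | c :: t => pvUpperChar c :: t

def word_change_possibilities_alt (word : String) : List String :=
  let w := word.toList
  let variants := pvB_fork w ['l', 'l'] 'ł' ++ pvB_fork w ['L', 'L'] 'Ł'
  let found := variants.foldl
    (fun s v =>
      let low := v.map pvLowerChar
      PySem.Set.update s [pvB_capitalizeFirst v, low, pvB_capitalizeFirst low])
    (PySem.Set.ofList [w])
  let out := PySem.List.sorted found (fun x => x) true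
  if w == pvB_capitalizeFirst w then
    (out.filter (fun x => x == pvB_capitalizeFirst x)
      ++ out.filter (fun x => !(x == pvB_capitalizeFirst x))).map String.ofList
  else out.map String.ofList

-- ===== PRECONDITION & SPEC =====

-- Pre_ excludes only the empty string, on which Python A raises IndexError (word[0])
def Pre_word_change_possibilities (word : String) : Prop := word ≠ ""
instance (word : String) : Decidable (Pre_word_change_possibilities word) := by
  unfold Pre_word_change_possibilities; infer_instance
def pvWitness_word_change_possibilities : String := "All"

def Spec_word_change_possibilities (word : String) (out : List String) : Prop :=
  out = word_change_possibilities_alt word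
instance (word : String) (out : List String) : Decidable (Spec_word_change_possibilities word out) := by
  unfold Spec_word_change_possibilities; infer_instance

-- ===== CLAIM (what is proved, stated in full; the proofs are below) =====
def Claim_equal_word_change_possibilities : Prop :=
  ∀ (word : String), Dom_word_change_possibilities word →
    Pre_word_change_possibilities word →
    Spec_word_change_possibilities word (word_change_possibilities word)



-- Char facts
theorem char_toNat_inj {a b : Char} : a = b ↔ a.toNat = b.toNat :=
  (Char.ext_iff).trans (UInt32.toNat_inj).symm

theorem char_le_iff {a b : Char} : a ≤ b ↔ a.toNat ≤ b.toNat :=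
  (Char.le_def).trans (UInt32.le_iff_toNat_le)

theorem pvLower_pvLower (c : Char) : pvLowerChar (pvLowerChar c) = pvLowerChar c := by
  unfold pvLowerChar PySem.Chars.lowerChar PySem.Chars.isupper
  split_ifs <;> try rfl
  all_goals
    simp only [Bool.and_eq_true, decide_eq_true_eq, char_toNat_inj, char_le_iff,
      Char.toNat_ofNat, Nat.isValidChar] at *
  all_goals norm_num at *
  all_goals first | omega | (split_ifs at * <;> omega)

theorem pvLower_pvUpper (c : Char) : pvLowerChar (pvUpperChar c) = pvLowerChar c := by
  unfold pvLowerChar pvUpperChar PySem.Chars.lowerChar PySem.Chars.upperChar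
    PySem.Chars.isupper PySem.Chars.islower
  split_ifs <;> try rfl
  all_goals
    simp only [Bool.and_eq_true, decide_eq_true_eq, char_toNat_inj, char_le_iff,
      Char.toNat_ofNat, Nat.isValidChar] at *
  all_goals norm_num at *
  all_goals first | omega | (split_ifs at * <;> omega)

-- case-transform identities
theorem lowercase_uppercase (v : List Char) :
    pvA_lowercase (pvA_uppercase v) = pvA_lowercase v := by
  cases v <;> simp [pvA_uppercase, pvA_lowercase, pvLower_pvUpper]

theorem lowercase_lowercase (v : List Char) :
    pvA_lowercase (pvA_lowercase v) = pvA_lowercase v := by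
  simp [pvA_lowercase, List.map_map, Function.comp_def, pvLower_pvLower]

theorem ltu_lowercase (v : List Char) :
    pvA_lowerThenUppercase (pvA_lowercase v) = pvA_lowerThenUppercase v := by
  simp [pvA_lowerThenUppercase, lowercase_lowercase]

theorem ltu_uppercase (v : List Char) :
    pvA_lowerThenUppercase (pvA_uppercase v) = pvA_lowerThenUppercase v := by
  simp [pvA_lowerThenUppercase, lowercase_uppercase]

-- the common middle object: all independent keep/replace choices, first position slowest
def pvM (a r : Char) : List Char → List (List Char)
  | [] => [[]]
  | c :: t =>
    if c = a ∧ t.head? = some a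
    then (pvM a r t).map (c :: ·) ++ (pvM a r t).map (r :: ·)
    else (pvM a r t).map (c :: ·)

def pvOccs (a : Char) (s : List Char) : List Nat :=
  (List.range s.length).filter (fun loc => (s.drop loc).take 2 == [a, a])

def pvSplice (r a : Char) (x : List Char) (p : Nat) : List Char :=
  x.take p ++ r :: a :: x.drop (p + 2)

def pvApplyZip (r a : Char) (s : List Char) (l : List (Nat × Bool)) : List Char :=
  l.foldl (fun opt pb => if pb.2 then pvSplice r a opt pb.1 else opt) s

theorem pvOccs_cons (a c : Char) (t : List Char) :
    pvOccs a (c :: t) =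
      (if c = a ∧ t.head? = some a then [0] else []) ++ (pvOccs a t).map (· + 1) := by
  unfold pvOccs
  rw [List.length_cons, List.range_succ_eq_map, List.filter_cons]
  have h0 : (((c :: t).drop 0).take 2 == [a, a]) = decide (c = a ∧ t.head? = some a) := by
    cases t <;> rw [Bool.eq_iff_iff] <;> simp
  rw [h0]
  have h1 : List.filter (fun loc => (((c :: t).drop loc).take 2 == [a, a]))
      (List.map (fun i => i + 1) (List.range t.length))
      = (pvOccs a t).map (· + 1) := by
    rw [List.filter_map]
    unfold pvOccs
    congr 1
  rw [h1]
  by_cases hm : c = a ∧ t.head? = some a <;> simp [hm, pvOccs]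

theorem pvSplice_shift (r a c : Char) (x : List Char) (p : Nat) :
    pvSplice r a (c :: x) (p + 1) = c :: pvSplice r a x p := by
  unfold pvSplice
  rw [List.take_succ_cons]
  have : p + 1 + 2 = (p + 2) + 1 := by omega
  rw [this, List.drop_succ_cons]
  simp

theorem pvApplyZip_shift (r a c : Char) (t : List Char) (l : List (Nat × Bool)) :
    pvApplyZip r a (c :: t) (l.map (fun pb => (pb.1 + 1, pb.2))) = c :: pvApplyZip r a t l := by
  induction l generalizing c t with
  | nil => rfl
  | cons pb rest ih =>
    unfold pvApplyZip at *
    simp only [List.map_cons, List.foldl_cons]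
    by_cases hb : pb.2 <;> simp only [hb, if_true, if_false, Bool.false_eq_true]
    · rw [pvSplice_shift, ih]
    · rw [ih]

theorem pvSplice_head (r a : Char) (t : List Char) (h : t.head? = some a) :
    pvSplice r a (a :: t) 0 = r :: t := by
  unfold pvSplice
  cases t with
  | nil => simp at h
  | cons d t' => simp_all

theorem pvProdBools_succ (n : Nat) :
    pvA_prodBools (n + 1) =
      (pvA_prodBools n).map (false :: ·) ++ (pvA_prodBools n).map (true :: ·) := by
  simp [pvA_prodBools]

theorem pvM_possibilities (a r : Char) (s : List Char) :
    (pvA_prodBools (pvOccs a s).length).map (fun comb => pvApplyZip r a s ((pvOccs a s).zip comb))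
      = pvM a r s := by
  induction s with
  | nil => rfl
  | cons c t ih =>
    rw [pvOccs_cons]
    by_cases hm : c = a ∧ t.head? = some a
    · rw [if_pos hm]
      simp only [List.singleton_append, List.length_cons, List.length_map]
      rw [pvProdBools_succ, List.map_append, List.map_map, List.map_map]
      have hfalse : ∀ comb : List Bool,
          pvApplyZip r a (c :: t) ((0 :: (pvOccs a t).map (· + 1)).zip (false :: comb))
            = c :: pvApplyZip r a t ((pvOccs a t).zip comb) := by
        intro comb
        rw [List.zip_cons_cons]
        unfold pvApplyZip
        simp only [List.foldl_cons]; rw [if_neg (by decide)]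
        rw [List.zip_map_left]
        have : (List.map (Prod.map (· + 1) id) ((pvOccs a t).zip comb))
            = ((pvOccs a t).zip comb).map (fun pb => (pb.1 + 1, pb.2)) := by
          simp [Prod.map]
        rw [this]
        exact pvApplyZip_shift r a c t _
      have htrue : ∀ comb : List Bool,
          pvApplyZip r a (c :: t) ((0 :: (pvOccs a t).map (· + 1)).zip (true :: comb))
            = r :: pvApplyZip r a t ((pvOccs a t).zip comb) := by
        intro comb
        rw [List.zip_cons_cons]
        unfold pvApplyZip
        simp only [List.foldl_cons]; rw [if_pos (by decide)]
        obtain ⟨hc, hh⟩ := hm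
        subst hc
        rw [pvSplice_head r c t hh]
        rw [List.zip_map_left]
        have : (List.map (Prod.map (· + 1) id) ((pvOccs c t).zip comb))
            = ((pvOccs c t).zip comb).map (fun pb => (pb.1 + 1, pb.2)) := by
          simp [Prod.map]
        rw [this]
        exact pvApplyZip_shift r c r t _
      rw [pvM]
      rw [if_pos hm, ← ih]
      congr 1
      · rw [List.map_map]; exact List.map_congr_left (fun comb _ => hfalse comb)
      · rw [List.map_map]; exact List.map_congr_left (fun comb _ => htrue comb)
    · rw [if_neg hm]
      simp only [List.nil_append, List.length_map]
      have hshift : ∀ comb : List Bool,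
          pvApplyZip r a (c :: t) (((pvOccs a t).map (· + 1)).zip comb)
            = c :: pvApplyZip r a t ((pvOccs a t).zip comb) := by
        intro comb
        rw [List.zip_map_left]
        have : (List.map (Prod.map (· + 1) id) ((pvOccs a t).zip comb))
            = ((pvOccs a t).zip comb).map (fun pb => (pb.1 + 1, pb.2)) := by
          simp [Prod.map]
        rw [this]
        exact pvApplyZip_shift r a c t _
      rw [pvM, if_neg hm, ← ih, List.map_map]
      exact List.map_congr_left (fun comb _ => hshift comb)

theorem occ_fold_eq (a : Char) (s : List Char) :
    (List.range s.length).foldl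
      (fun (acc : List Nat) (loc : Nat) =>
        if PySem.List.slice s (some (loc : Int)) (some ((loc : Int) + (([a, a] : List Char).length : Int))) == [a, a]
        then acc ++ [loc] else acc) []
      = pvOccs a s := by
  have hcond : ∀ loc : Nat,
      (PySem.List.slice s (some (loc : Int)) (some ((loc : Int) + (([a, a] : List Char).length : Int))) == [a, a])
        = ((s.drop loc).take 2 == [a, a]) := by
    intro loc
    have := PySem.List.slice_natCast_add (xs := s) (j := loc) (n := 2)
    simp only [List.length_cons, List.length_nil] at *
    rw [show (((2 : Nat) : Int)) = (2 : Int) by norm_num] at this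
    rw [show ((((1 : Nat) + 1 : Nat)) : Int) = (2 : Int) by norm_num]
    rw [this]
  have := PySem.List.foldl_congr_mem
    (l := List.range s.length)
    (f := fun (acc : List Nat) (loc : Nat) =>
      if PySem.List.slice s (some (loc : Int)) (some ((loc : Int) + (([a, a] : List Char).length : Int))) == [a, a]
      then acc ++ [loc] else acc)
    (g := fun (acc : List Nat) (loc : Nat) =>
      if (s.drop loc).take 2 == [a, a] then acc ++ [loc] else acc)
    (init := [])
    (by intro acc x _; simp only []; rw [hcond])
  rw [this, PySem.List.foldl_append_if_eq_filter]
  rfl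

theorem pvProdBools_length {n : Nat} {comb : List Bool} (h : comb ∈ pvA_prodBools n) :
    comb.length = n := by
  induction n generalizing comb with
  | zero => simp [pvA_prodBools] at h; simp [h]
  | succ m ih =>
    rw [pvProdBools_succ] at h
    rcases List.mem_append.mp h with h' | h' <;>
      · obtain ⟨c', hc', rfl⟩ := List.mem_map.mp h'
        simp [ih hc']

theorem zipfold_eq (r a : Char) (occ : List Nat) (comb : List Bool)
    (h : comb.length = occ.length) (s : List Char) :
    (List.range occ.length).foldl
      (fun opt (j : Nat) =>
        if PySem.List.pyGetD comb (j : Int) false then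
          pvSplice r a opt (PySem.List.pyGetD occ (j : Int) 0)
        else opt) s
      = pvApplyZip r a s (occ.zip comb) := by
  induction occ using List.reverseRecOn generalizing comb s with
  | nil =>
    rw [List.length_eq_zero_iff.mp h]
    rfl
  | append_singleton os p ih =>
    rcases List.eq_nil_or_concat comb with rfl | ⟨cs, b, rfl⟩
    · simp at h
    simp only [List.concat_eq_append] at *
    have hlen : cs.length = os.length := by simp at h; omega
    rw [List.length_append, List.length_singleton, List.range_succ, List.foldl_append]
    have hinner :
        (List.range os.length).foldl
          (fun opt (j : Nat) =>
            if PySem.List.pyGetD (cs ++ [b]) (j : Int) false then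
              pvSplice r a opt (PySem.List.pyGetD (os ++ [p]) (j : Int) 0)
            else opt) s
        = pvApplyZip r a s (os.zip cs) := by
      have hc := PySem.List.foldl_congr_mem
        (l := List.range os.length)
        (f := fun opt (j : Nat) =>
          if PySem.List.pyGetD (cs ++ [b]) (j : Int) false then
            pvSplice r a opt (PySem.List.pyGetD (os ++ [p]) (j : Int) 0)
          else opt)
        (g := fun opt (j : Nat) =>
          if PySem.List.pyGetD cs (j : Int) false then
            pvSplice r a opt (PySem.List.pyGetD os (j : Int) 0)
          else opt)
        (init := s)
        (by
          intro acc x hx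
          have hxlt : x < os.length := List.mem_range.mp hx
          simp only []
          rw [PySem.List.pyGetD_natCast, PySem.List.pyGetD_natCast,
              PySem.List.pyGetD_natCast, PySem.List.pyGetD_natCast]
          rw [List.getD_append _ _ _ _ (by omega), List.getD_append _ _ _ _ (by omega)])
      rw [hc]
      exact ih cs hlen s
    rw [hinner]
    have hzip : (os ++ [p]).zip (cs ++ [b]) = os.zip cs ++ [(p, b)] :=
      List.zip_append hlen.symm
    rw [hzip]
    unfold pvApplyZip
    rw [List.foldl_append]
    simp only [List.foldl_cons, List.foldl_nil]
    rw [PySem.List.pyGetD_natCast, PySem.List.pyGetD_natCast]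
    rw [show (cs ++ [b]).getD os.length false = b by
          rw [← hlen]; simp [List.getD_eq_getElem?_getD],
        show (os ++ [p]).getD os.length 0 = p by
          simp [List.getD_eq_getElem?_getD]]

theorem splice_slices (r a : Char) (opt : List Char) (p : Nat) :
    PySem.List.slice opt none (some ((p : Nat) : Int)) ++ [r, a]
      ++ PySem.List.slice opt (some (((p : Nat) : Int) + (([a, a] : List Char).length : Int))) none
      = pvSplice r a opt p := by
  rw [PySem.List.slice_to_natCast]
  have h2 : (((p : Nat) : Int) + (([a, a] : List Char).length : Int)) = (((p + 2 : Nat)) : Int) := by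
    push_cast
    norm_num
  rw [h2, PySem.List.slice_from_natCast]
  simp [pvSplice]

theorem map_range_getD {α β : Type} (xs : List α) (d : α) (g : α → β) :
    (List.range xs.length).map (fun i => g (xs.getD i d)) = xs.map g := by
  apply List.ext_getElem
  · simp
  · intro i h1 h2
    simp only [List.getElem_map, List.getD_eq_getElem?_getD, List.getElem_range]
    rw [List.getElem?_eq_getElem (by simpa using h2)]
    rfl

theorem deepReplace_eq (a r : Char) (s : List Char) :
    pvA_deepReplace s [a, a] [r, a] = pvM a r s := by
  unfold pvA_deepReplace
  simp only [occ_fold_eq a s]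
  by_cases hlen : (pvOccs a s).length = 0
  · rw [if_pos hlen]
    have hm := pvM_possibilities a r s
    rw [List.length_eq_zero_iff.mp hlen] at hm
    simpa [pvA_prodBools, pvApplyZip] using hm
  · rw [if_neg hlen]
    rw [PySem.List.foldl_append_singleton_eq_map, List.nil_append]
    have hstep : ∀ i ∈ List.range (pvA_prodBools (pvOccs a s).length).length,
        (List.range (pvOccs a s).length).foldl
          (fun option (j : Nat) =>
            if PySem.List.pyGetD (PySem.List.pyGetD (pvA_prodBools (pvOccs a s).length) (i : Int) []) (j : Int) false then
              PySem.List.slice option none (some (((PySem.List.pyGetD (pvOccs a s) (j : Int) 0 : Nat) : Int)))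
                ++ [r, a]
                ++ PySem.List.slice option (some (((PySem.List.pyGetD (pvOccs a s) (j : Int) 0 : Nat) : Int) + (([a, a] : List Char).length : Int))) none
            else option) s
        = pvApplyZip r a s ((pvOccs a s).zip ((pvA_prodBools (pvOccs a s).length).getD i [])) := by
      intro i hi
      have hilt : i < (pvA_prodBools (pvOccs a s).length).length := List.mem_range.mp hi
      rw [PySem.List.pyGetD_natCast]
      set comb := (pvA_prodBools (pvOccs a s).length).getD i [] with hcombdef
      have hcombmem : comb ∈ pvA_prodBools (pvOccs a s).length := by
        rw [hcombdef, List.getD_eq_getElem?_getD, List.getElem?_eq_getElem hilt]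
        exact List.getElem_mem hilt
      have hcomblen : comb.length = (pvOccs a s).length := pvProdBools_length hcombmem
      have hbody := PySem.List.foldl_congr_mem
        (l := List.range (pvOccs a s).length)
        (f := fun option (j : Nat) =>
          if PySem.List.pyGetD comb (j : Int) false then
            PySem.List.slice option none (some (((PySem.List.pyGetD (pvOccs a s) (j : Int) 0 : Nat) : Int)))
              ++ [r, a]
              ++ PySem.List.slice option (some (((PySem.List.pyGetD (pvOccs a s) (j : Int) 0 : Nat) : Int) + (([a, a] : List Char).length : Int))) none
          else option)
        (g := fun option (j : Nat) =>
          if PySem.List.pyGetD comb (j : Int) false then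
            pvSplice r a option (PySem.List.pyGetD (pvOccs a s) (j : Int) 0)
          else option)
        (init := s)
        (by intro acc x _; simp only []; rw [splice_slices])
      rw [hbody]
      exact zipfold_eq r a (pvOccs a s) comb hcomblen s
    rw [List.map_congr_left hstep]
    have hmr : (List.range (pvA_prodBools (pvOccs a s).length).length).map
        (fun i => pvApplyZip r a s ((pvOccs a s).zip ((pvA_prodBools (pvOccs a s).length).getD i [])))
        = (pvA_prodBools (pvOccs a s).length).map (fun comb => pvApplyZip r a s ((pvOccs a s).zip comb)) :=
      map_range_getD (pvA_prodBools (pvOccs a s).length) []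
        (fun comb => pvApplyZip r a s ((pvOccs a s).zip comb))
    rw [hmr]
    exact pvM_possibilities a r s

def pvForkStep (a r : Char) (s : List Char) :
    (List (List Char) × List Char) → (Int × Char) → (List (List Char) × List Char) :=
  fun ob jc =>
    if PySem.List.slice s (some jc.1) (some (jc.1 + 2)) == [a, a] then
      (ob.1.flatMap (fun p => [p ++ ob.2 ++ [jc.2], p ++ ob.2 ++ [r]]), [])
    else
      (ob.1, ob.2 ++ [jc.2])

theorem fork_aux (a r : Char) (s : List Char) :
    ∀ (t : List Char) (j : Nat) (acc : List (List Char)) (buf : List Char), s.drop j = t →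
      ((PySem.List.enumerate t (j : Int)).foldl (pvForkStep a r s) (acc, buf)).1.map
          (fun p => p ++ ((PySem.List.enumerate t (j : Int)).foldl (pvForkStep a r s) (acc, buf)).2)
      = acc.flatMap (fun p => (pvM a r t).map (fun v => p ++ buf ++ v)) := by
  intro t
  induction t with
  | nil =>
    intro j acc buf _
    simp only [PySem.List.enumerate, List.foldl_nil, pvM]
    induction acc with
    | nil => rfl
    | cons x xs ihacc => simp_all
  | cons c t' ih =>
    intro j acc buf hdrop
    have henum : PySem.List.enumerate (c :: t') (j : Int)
        = ((j : Int), c) :: PySem.List.enumerate t' ((j : Int) + 1) := by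
      simp [PySem.List.enumerate]
    rw [henum, List.foldl_cons]
    have hj1 : ((j : Int) + 1) = (((j + 1 : Nat)) : Int) := by push_cast; ring
    have hdrop' : s.drop (j + 1) = t' := by
      rw [← List.drop_drop, hdrop]; simp
    have hcond : (PySem.List.slice s (some ((j : Int), c).1) (some (((j : Int), c).1 + 2)) == [a, a])
        = decide (c = a ∧ t'.head? = some a) := by
      have h2 := PySem.List.slice_natCast_add (xs := s) (j := j) (n := 2)
      rw [show (((2 : Nat) : Int)) = (2 : Int) by norm_num] at h2
      simp only []
      rw [h2, hdrop]
      cases t' <;> rw [Bool.eq_iff_iff] <;> simp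
    by_cases hm : c = a ∧ t'.head? = some a
    · have hstep : pvForkStep a r s (acc, buf) ((j : Int), c)
          = (acc.flatMap (fun p => [p ++ buf ++ [c], p ++ buf ++ [r]]), []) := by
        unfold pvForkStep
        rw [hcond, if_pos (by simp [hm])]
      rw [hstep, hj1, ih (j + 1) _ _ hdrop']
      rw [pvM, if_pos hm]
      rw [List.flatMap_assoc]
      apply List.flatMap_congr
      intro p _
      simp [List.map_map, Function.comp_def, List.map_append, List.append_assoc]
    · have hstep : pvForkStep a r s (acc, buf) ((j : Int), c) = (acc, buf ++ [c]) := by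
        unfold pvForkStep
        rw [hcond, if_neg (by simp [hm])]
      rw [hstep, hj1, ih (j + 1) _ _ hdrop']
      rw [pvM, if_neg hm]
      apply List.flatMap_congr
      intro p _
      simp [List.map_map, Function.comp_def, List.append_assoc]

theorem fork_eq (a r : Char) (s : List Char) : pvB_fork s [a, a] r = pvM a r s := by
  unfold pvB_fork
  have hl : (fun (ob : List (List Char) × List Char) (jc : Int × Char) =>
      if PySem.List.slice s (some jc.1) (some (jc.1 + 2)) == [a, a] then
        (ob.1.flatMap (fun p => [p ++ ob.2 ++ [jc.2], p ++ ob.2 ++ [r]]), ([] : List Char))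
      else
        (ob.1, ob.2 ++ [jc.2])) = pvForkStep a r s := rfl
  rw [hl]
  have h := fork_aux a r s s 0 [[]] [] (by simp)
  simpa using h

-- the two ellification variant lists are equal
theorem variants_eq (w : List Char) :
    pvA_ellify w = pvB_fork w ['l', 'l'] 'ł' ++ pvB_fork w ['L', 'L'] 'Ł' := by
  unfold pvA_ellify
  rw [deepReplace_eq, deepReplace_eq, fork_eq, fork_eq]

-- appliers, evaluated
def pvAppliersLit : List (List Bool) :=
  [[true, true, true], [true, true, false], [true, false, true], [true, false, false],
   [false, true, true], [false, true, false], [false, false, true]]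

set_option maxRecDepth 8192 in
theorem appliers_eq :
    PySem.List.sorted
      (PySem.Set.ofList (PySem.List.permutations
        (List.replicate 3 true ++ List.replicate (3 - 1) false) 3))
      (fun x => x) true = pvAppliersLit := by decide

def pvCfsLit : List (List Char → List Char) := [pvA_uppercase, pvA_lowercase, pvA_lowerThenUppercase]

theorem apply_eval (v : List Char) :
    pvAppliersLit.map (fun ap => (pvA_applyPossibility v ap pvCfsLit).getD [])
      = [pvA_lowerThenUppercase v, pvA_lowercase v, pvA_lowerThenUppercase v, pvA_uppercase v,
         pvA_lowerThenUppercase v, pvA_lowercase v, pvA_lowerThenUppercase v] := by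
  show [pvA_lowerThenUppercase (pvA_lowercase (pvA_uppercase v)),
        pvA_lowercase (pvA_uppercase v),
        pvA_lowerThenUppercase (pvA_uppercase v),
        pvA_uppercase v,
        pvA_lowerThenUppercase (pvA_lowercase v),
        pvA_lowercase v,
        pvA_lowerThenUppercase v] = _
  simp [ltu_lowercase, ltu_uppercase, lowercase_uppercase]

-- generic fold-of-updates lemmas
theorem foldl_update_mem {β : Type} (l : List β) (g : β → List (List Char)) (s0 : PySem.Set (List Char))
    (x : List Char) :
    (x ∈ l.foldl (fun s e => PySem.Set.update s (g e)) s0) ↔ x ∈ s0 ∨ ∃ e ∈ l, x ∈ g e := by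
  induction l generalizing s0 with
  | nil => simp
  | cons e rest ih =>
    rw [List.foldl_cons, ih]
    rw [PySem.Set.mem_update]
    simp only [List.mem_cons]
    constructor
    · rintro ((h | h) | ⟨e', he', hx⟩)
      · exact Or.inl h
      · exact Or.inr ⟨e, Or.inl rfl, h⟩
      · exact Or.inr ⟨e', Or.inr he', hx⟩
    · rintro (h | ⟨e', (rfl | he'), hx⟩)
      · exact Or.inl (Or.inl h)
      · exact Or.inl (Or.inr hx)
      · exact Or.inr ⟨e', he', hx⟩

theorem foldl_update_nodup {β : Type} (l : List β) (g : β → List (List Char)) (s0 : PySem.Set (List Char))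
    (h : s0.Nodup) : (l.foldl (fun s e => PySem.Set.update s (g e)) s0).Nodup := by
  induction l generalizing s0 with
  | nil => exact h
  | cons e rest ih => exact ih _ (PySem.Set.nodup_update _ _ h)

theorem cap_eq : pvB_capitalizeFirst = pvA_uppercase := by
  funext s; cases s <;> rfl

theorem ltu_def (v : List Char) : pvA_lowerThenUppercase v = pvA_uppercase (pvA_lowercase v) := rfl

def pvVariants (w : List Char) : List (List Char) :=
  pvB_fork w ['l', 'l'] 'ł' ++ pvB_fork w ['L', 'L'] 'Ł'

theorem mem_triples (e x : List Char) :
    (x ∈ pvAppliersLit.map (fun ap => (pvA_applyPossibility e ap pvCfsLit).getD []))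
      ↔ x ∈ [pvB_capitalizeFirst e, e.map pvLowerChar, pvB_capitalizeFirst (e.map pvLowerChar)] := by
  rw [apply_eval, cap_eq]
  have hlow : e.map pvLowerChar = pvA_lowercase e := rfl
  rw [hlow, ← ltu_def]
  simp only [List.mem_cons, List.not_mem_nil, or_false]
  tauto

theorem sorted_sets_eq (w : List Char) :
    PySem.List.sorted
      ((pvA_ellify w).foldl
        (fun s e => PySem.Set.update s (pvAppliersLit.map (fun ap => (pvA_applyPossibility e ap pvCfsLit).getD [])))
        (PySem.Set.ofList [w])) (fun x => x) true
    = PySem.List.sorted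
      ((pvVariants w).foldl
        (fun s v => PySem.Set.update s [pvB_capitalizeFirst v, v.map pvLowerChar, pvB_capitalizeFirst (v.map pvLowerChar)])
        (PySem.Set.ofList [w])) (fun x => x) true := by
  set A := (pvA_ellify w).foldl
    (fun s e => PySem.Set.update s (pvAppliersLit.map (fun ap => (pvA_applyPossibility e ap pvCfsLit).getD [])))
    (PySem.Set.ofList [w]) with hA
  set B := (pvVariants w).foldl
    (fun s v => PySem.Set.update s [pvB_capitalizeFirst v, v.map pvLowerChar, pvB_capitalizeFirst (v.map pvLowerChar)])
    (PySem.Set.ofList [w]) with hB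
  have hnodupA : A.Nodup := foldl_update_nodup _ _ _ (PySem.Set.nodup_ofList _)
  have hnodupB : B.Nodup := foldl_update_nodup _ _ _ (PySem.Set.nodup_ofList _)
  have hmem : ∀ x, x ∈ A ↔ x ∈ B := by
    intro x
    rw [hA, hB, foldl_update_mem, foldl_update_mem]
    have hv : pvA_ellify w = pvVariants w := variants_eq w
    rw [hv]
    constructor
    · rintro (h | ⟨e, he, hx⟩)
      · exact Or.inl h
      · exact Or.inr ⟨e, he, (mem_triples e x).mp hx⟩
    · rintro (h | ⟨e, he, hx⟩)
      · exact Or.inl h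
      · exact Or.inr ⟨e, he, (mem_triples e x).mpr hx⟩
  have hperm : A.Perm B := (List.perm_ext_iff_of_nodup hnodupA hnodupB).mpr hmem
  set ys := PySem.List.sorted B (fun x => x) true with hys
  have hpys : ys.Perm B := PySem.List.sorted_perm B (fun x => x) true
  have hpermYA : ys.Perm A := hpys.trans hperm.symm
  have hpw : List.Pairwise (fun a b : List Char => b ≤ a) ys := by
    rw [hys, show (fun a b : List Char => a.decidableLT b) = (LinearOrder.toDecidableLT : DecidableLT (List Char)) from Subsingleton.elim _ _]
    exact PySem.List.sorted_pairwise_rev B (fun x => x)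
  have hnys : ys.Nodup := (hpys.nodup_iff).mpr hnodupB
  have hgt : List.Pairwise (fun a b : List Char => b < a) ys := by
    have := List.Pairwise.and hpw hnys
    exact this.imp (fun {a b} h => lt_of_le_of_ne h.1 (fun he => h.2 he.symm))
  rw [show (fun a b : List Char => a.decidableLT b) = (LinearOrder.toDecidableLT : DecidableLT (List Char)) from Subsingleton.elim _ _]
  exact PySem.List.sorted_rev_eq_of_perm_of_pairwise_gt A ys (fun x => x) hpermYA hgt

theorem move_fold (l : List (List Char)) (u0 l0 : List (List Char)) :
    l.foldl
      (fun (ul : List (List Char) × List (List Char)) entry =>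
        if entry == pvA_uppercase entry then (ul.1 ++ [entry], ul.2) else (ul.1, ul.2 ++ [entry]))
      (u0, l0)
    = (u0 ++ l.filter (fun x => x == pvA_uppercase x),
       l0 ++ l.filter (fun x => !(x == pvA_uppercase x))) := by
  induction l generalizing u0 l0 with
  | nil => simp
  | cons e rest ih =>
    rw [List.foldl_cons]
    by_cases he : (e == pvA_uppercase e) = true
    · rw [if_pos he, ih]
      simp [he]
    · rw [if_neg he, ih]
      simp [he]

theorem move_eq (l : List (List Char)) :
    pvA_moveUppercaseToFront l
      = l.filter (fun x => x == pvA_uppercase x) ++ l.filter (fun x => !(x == pvA_uppercase x)) := by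
  unfold pvA_moveUppercaseToFront
  rw [move_fold]
  simp

theorem appliers_eq' :
    PySem.List.sorted
      (PySem.Set.ofList (PySem.List.permutations
        (List.replicate ([pvA_uppercase, pvA_lowercase, pvA_lowerThenUppercase] : List (List Char → List Char)).length true
          ++ List.replicate (([pvA_uppercase, pvA_lowercase, pvA_lowerThenUppercase] : List (List Char → List Char)).length - 1) false)
        ([pvA_uppercase, pvA_lowercase, pvA_lowerThenUppercase] : List (List Char → List Char)).length))
      (fun x => x) true = pvAppliersLit := by
  have h3 : ([pvA_uppercase, pvA_lowercase, pvA_lowerThenUppercase] : List (List Char → List Char)).length = 3 := rfl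
  rw [h3]
  exact appliers_eq

theorem main_eq (word : String) :
    word_change_possibilities word = word_change_possibilities_alt word := by
  unfold word_change_possibilities word_change_possibilities_alt
  simp only [appliers_eq']
  rw [show ([pvA_uppercase, pvA_lowercase, pvA_lowerThenUppercase] : List (List Char → List Char)) = pvCfsLit from rfl]
  simp only [← PySem.Set.update_map_eq_foldl_add]
  rw [show (pvB_fork word.toList ['l', 'l'] 'ł' ++ pvB_fork word.toList ['L', 'L'] 'Ł') = pvVariants word.toList from rfl]
  rw [sorted_sets_eq word.toList]
  rw [move_eq]
  rw [cap_eq]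

-- ===== VERDICT (by name: the statement is the Claim_ definition above) =====
theorem word_change_possibilities_spec : Claim_equal_word_change_possibilities := by
  intro word _ _
  exact main_eq word
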